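-- pv_equiv track=rewrite | github.com/matiasportugau-ui/Dashboard-bmc | tools/prompt_evolver.py | count_consecutive_blank_runs_over_two
-- ===== SOURCE A (Python) =====
-- from typing import Iterable, List, Optional, Tuple
--
-- def count_consecutive_blank_runs_over_two(lines: List[str]) -> int:
--     count_runs = 0
--     current_run = 0
--     for line in lines:
--         if line.strip() == "":
--             current_run += 1
--         else:
--             if current_run > 2:
--                 count_runs += 1
--             current_run = 0
--     if current_run > 2:
--         count_runs += 1
--     return count_runs
-- ===== SOURCE B (Python) =====
-- def count_consecutive_blank_runs_over_two(lines):
--     # Staged formulation: precompute blank flags, then count the start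
--     # positions of maximal blank runs of length >= 3.
--     blank = [line.strip() == "" for line in lines]
--     n = len(blank)
--     return sum(
--         1
--         for i in range(n - 2)
--         if blank[i] and blank[i + 1] and blank[i + 2]
--         and (i == 0 or not blank[i - 1])
--     )
-- ===== Notes on version B (the rewrite author's own statement) =====
-- stated objective: alternative
-- what changed: B is a staged two-pass formulation: it first precomputes the list of blank flags, then counts the indices i that start a maximal blank run of length >= 3 (blank[i..i+2] all blank and position i-1 not blank), instead of A's running counter with an end-of-run/post-loop flush.
import Mathlib
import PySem

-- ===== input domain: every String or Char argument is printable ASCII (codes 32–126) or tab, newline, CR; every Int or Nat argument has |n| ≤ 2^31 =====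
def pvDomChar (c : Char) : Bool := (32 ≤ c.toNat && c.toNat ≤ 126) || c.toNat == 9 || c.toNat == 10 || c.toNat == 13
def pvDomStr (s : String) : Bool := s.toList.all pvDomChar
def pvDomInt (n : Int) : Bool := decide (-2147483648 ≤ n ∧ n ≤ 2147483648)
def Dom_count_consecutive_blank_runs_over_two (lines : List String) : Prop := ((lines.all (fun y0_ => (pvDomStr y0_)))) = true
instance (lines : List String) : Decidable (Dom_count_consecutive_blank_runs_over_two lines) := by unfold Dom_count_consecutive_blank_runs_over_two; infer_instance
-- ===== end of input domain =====

-- B stages the work: precompute blank flags, then count indices that start a maximal blank run of length ≥ 3 (alternative decomposition, same cost).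

-- ===== PORT A =====
-- A: fold carrying (count_runs, current_run); after the loop a final flush of current_run.
def count_consecutive_blank_runs_over_two (lines : List String) : Int :=
  let s := lines.foldl
    (fun (st : Int × Int) line =>
      if PySem.Str.strip line == "" then (st.1, st.2 + 1)
      else (if st.2 > 2 then st.1 + 1 else st.1, 0))
    (0, 0)
  if s.2 > 2 then s.1 + 1 else s.1

-- ===== PORT B =====
-- B: first pass builds the blank-flag list; second pass counts run-start indices i
-- with blank[i], blank[i+1], blank[i+2] and (i == 0 or not blank[i-1]).
def count_consecutive_blank_runs_over_two_alt (lines : List String) : Int :=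
  let blank := lines.map (fun line => PySem.Str.strip line == "")
  let n := blank.length
  (((List.range (n - 2)).filter (fun i =>
      blank.getD i false && blank.getD (i + 1) false && blank.getD (i + 2) false &&
      (i == 0 || !blank.getD (i - 1) false))).length : Int)

-- ===== PRECONDITION & SPEC =====
def Spec_count_consecutive_blank_runs_over_two (lines : List String) (out : Int) : Prop := out = count_consecutive_blank_runs_over_two_alt lines
instance (lines : List String) (out : Int) : Decidable (Spec_count_consecutive_blank_runs_over_two lines out) := by unfold Spec_count_consecutive_blank_runs_over_two; infer_instance

-- ===== CLAIM (what is proved, stated in full; the proofs are below) =====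
def Claim_equal_count_consecutive_blank_runs_over_two : Prop := ∀ (lines : List String), Dom_count_consecutive_blank_runs_over_two lines → Spec_count_consecutive_blank_runs_over_two lines (count_consecutive_blank_runs_over_two lines)

-- ===== LEMMAS AND PROOFS =====

-- A's remaining output given a pending blank count r, over the string list
def pvG (r : Int) : List String → Int
  | [] => if r > 2 then 1 else 0
  | l :: ls =>
    if PySem.Str.strip l == "" then pvG (r + 1) ls
    else (if r > 2 then 1 else 0) + pvG 0 ls

-- the same, over the boolean blank list
def pvGB (r : Int) : List Bool → Int
  | [] => if r > 2 then 1 else 0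
  | b :: bs =>
    if b then pvGB (r + 1) bs
    else (if r > 2 then 1 else 0) + pvGB 0 bs

-- recursive run-start counter with a "previous line blank" flag
def pvC : Bool → List Bool → Nat
  | _, [] => 0
  | prev, b :: bs =>
    (if b && bs.getD 0 false && bs.getD 1 false && !prev then 1 else 0) + pvC b bs

-- number of leading blank flags
def pvLead : List Bool → Nat
  | [] => 0
  | b :: bs => if b then pvLead bs + 1 else 0

-- B's index predicate with an explicit "previous before index 0" flag
def pvPred (prev : Bool) (bs : List Bool) (i : Nat) : Bool :=
  bs.getD i false && bs.getD (i + 1) false && bs.getD (i + 2) false &&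
  (if i = 0 then !prev else !bs.getD (i - 1) false)

def pvCnt (prev : Bool) (bs : List Bool) : Nat :=
  ((List.range (bs.length - 2)).filter (pvPred prev bs)).length

theorem pvA_fold_eq_pvG : ∀ (ls : List String) (c r : Int),
    (if (ls.foldl
      (fun (st : Int × Int) line =>
        if PySem.Str.strip line == "" then (st.1, st.2 + 1)
        else (if st.2 > 2 then st.1 + 1 else st.1, 0)) (c, r)).2 > 2
     then (ls.foldl
      (fun (st : Int × Int) line =>
        if PySem.Str.strip line == "" then (st.1, st.2 + 1)
        else (if st.2 > 2 then st.1 + 1 else st.1, 0)) (c, r)).1 + 1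
     else (ls.foldl
      (fun (st : Int × Int) line =>
        if PySem.Str.strip line == "" then (st.1, st.2 + 1)
        else (if st.2 > 2 then st.1 + 1 else st.1, 0)) (c, r)).1) = c + pvG r ls := by
  intro ls
  induction ls with
  | nil =>
    intro c r
    simp only [List.foldl_nil, pvG]
    split_ifs <;> ring
  | cons l rest ih =>
    intro c r
    simp only [List.foldl_cons, pvG]
    by_cases h : PySem.Str.strip l == ""
    · simp only [h, if_true]
      exact ih c (r + 1)
    · simp only [h, if_false, Bool.false_eq_true]
      rw [ih]
      split_ifs <;> ring

theorem pvG_eq_pvGB : ∀ (ls : List String) (r : Int),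
    pvG r ls = pvGB r (ls.map (fun line => PySem.Str.strip line == "")) := by
  intro ls
  induction ls with
  | nil => intro r; simp [pvG, pvGB]
  | cons l rest ih =>
    intro r
    by_cases h : PySem.Str.strip l == "" <;>
      simp [pvG, pvGB, h, ih]

-- splitting a filtered range at 0
theorem pvRange_filter_succ (k : Nat) (p : Nat → Bool) :
    ((List.range (k + 1)).filter p).length
      = (if p 0 then 1 else 0) + ((List.range k).filter (fun j => p (j + 1))).length := by
  have h2 : List.filter (p ∘ Nat.succ) (List.range k)
      = List.filter (fun j => p (j + 1)) (List.range k) :=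
    List.filter_congr (fun x _ => rfl)
  rw [List.range_succ_eq_map]
  cases h : p 0 <;> simp [h, List.filter_map, h2]
  omega

theorem pvPred_shift (prev b : Bool) (bs : List Bool) (j : Nat) :
    pvPred prev (b :: bs) (j + 1) = pvPred b bs j := by
  cases j with
  | zero => simp [pvPred]
  | succ m => simp [pvPred]

theorem pvCnt_cons (prev b : Bool) (bs : List Bool) :
    pvCnt prev (b :: bs)
      = (if b && bs.getD 0 false && bs.getD 1 false && !prev then 1 else 0) + pvCnt b bs := by
  match bs with
  | [] => simp [pvCnt]
  | [x] => simp [pvCnt]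
  | x :: y :: t =>
    unfold pvCnt
    simp only [List.length_cons]
    rw [show t.length + 1 + 1 + 1 - 2 = (t.length + 1 + 1 - 2) + 1 by omega,
      pvRange_filter_succ]
    have hsh : List.filter (fun j => pvPred prev (b :: x :: y :: t) (j + 1))
        (List.range (t.length + 1 + 1 - 2))
        = List.filter (pvPred b (x :: y :: t)) (List.range (t.length + 1 + 1 - 2)) :=
      List.filter_congr (fun j _ => pvPred_shift prev b _ j)
    rw [hsh]
    simp [pvPred]

theorem pvCnt_eq_pvC : ∀ (bs : List Bool) (prev : Bool), pvCnt prev bs = pvC prev bs := by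
  intro bs
  induction bs with
  | nil => intro prev; simp [pvCnt, pvC]
  | cons b rest ih =>
    intro prev
    rw [pvCnt_cons, pvC, ih]

theorem pvLead_ge_two (bs : List Bool) :
    (bs.getD 0 false && bs.getD 1 false) = true ↔ 2 ≤ pvLead bs := by
  match bs with
  | [] => simp [pvLead]
  | [x] => cases x <;> simp [pvLead]
  | x :: y :: t => cases x <;> cases y <;> simp [pvLead]

theorem pvGB_eq_pvC : ∀ (bs : List Bool) (r : Int), 0 ≤ r →
    pvGB r bs = (pvC (decide (1 ≤ r)) bs : Int) +
      (if 1 ≤ r ∧ r + (pvLead bs : Int) > 2 then 1 else 0) := by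
  intro bs
  induction bs with
  | nil =>
    intro r hr
    simp only [pvGB, pvC, pvLead, Nat.cast_zero, add_zero, zero_add]
    split_ifs <;> omega
  | cons b rest ih =>
    intro r hr
    cases b with
    | false =>
      show (if r > 2 then (1:Int) else 0) + pvGB 0 rest = _
      have ih0 := ih 0 le_rfl
      rw [show (decide ((1:Int) ≤ 0)) = false from by decide] at ih0
      rw [if_neg (by omega : ¬((1:Int) ≤ 0 ∧ (0:Int) + (pvLead rest : Int) > 2)),
        add_zero] at ih0
      rw [ih0]
      simp only [pvC, pvLead, Bool.false_and, Bool.false_eq_true, if_false, Nat.cast_zero,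
        add_zero, zero_add]
      split_ifs <;> omega
    | true =>
      show pvGB (r + 1) rest = _
      have ih1 := ih (r + 1) (by omega)
      rw [show (decide ((1:Int) ≤ r + 1)) = true from by simpa using by omega] at ih1
      rw [ih1]
      have hLead : pvLead (true :: rest) = pvLead rest + 1 := by simp [pvLead]
      rw [hLead]
      by_cases hr1 : (1:Int) ≤ r
      · rw [show (decide ((1:Int) ≤ r)) = true from by simpa using hr1]
        simp only [pvC, Bool.not_true, Bool.and_false, Bool.false_eq_true, if_false,
          zero_add]
        split_ifs <;> omega
      · have hr0 : r = 0 := by omega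
        subst hr0
        rw [show (decide ((1:Int) ≤ 0)) = false from by decide]
        simp only [pvC, Bool.not_false, Bool.and_true, Bool.true_and]
        by_cases hg : (rest.getD 0 false && rest.getD 1 false) = true
        · have h2 := (pvLead_ge_two rest).mp hg
          rw [if_pos hg]
          split_ifs <;> push_cast <;> omega
        · have h2 : ¬ 2 ≤ pvLead rest := fun h => hg ((pvLead_ge_two rest).mpr h)
          rw [if_neg hg]
          split_ifs <;> omega

-- B's port predicate agrees pointwise with pvPred false
theorem pvPred_false_eq (bs : List Bool) (i : Nat) :
    (bs.getD i false && bs.getD (i + 1) false && bs.getD (i + 2) false &&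
      (i == 0 || !bs.getD (i - 1) false)) = pvPred false bs i := by
  cases i with
  | zero => simp [pvPred]
  | succ m => simp [pvPred]

theorem pvAlt_eq_pvC (lines : List String) :
    count_consecutive_blank_runs_over_two_alt lines
      = (pvC false (lines.map (fun line => PySem.Str.strip line == "")) : Int) := by
  rw [← pvCnt_eq_pvC]
  exact congrArg (fun l => (l.length : Int))
    (List.filter_congr
      (fun i _ => pvPred_false_eq (lines.map (fun line => PySem.Str.strip line == "")) i))

-- ===== VERDICT (by name: the statement is the Claim_ definition above) =====
theorem count_consecutive_blank_runs_over_two_spec : Claim_equal_count_consecutive_blank_runs_over_two := by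
  intro lines _
  unfold Spec_count_consecutive_blank_runs_over_two
  have hA : count_consecutive_blank_runs_over_two lines = 0 + pvG 0 lines :=
    pvA_fold_eq_pvG lines 0 0
  rw [hA, zero_add, pvG_eq_pvGB, pvGB_eq_pvC _ 0 le_rfl, pvAlt_eq_pvC,
    show (decide ((1:Int) ≤ 0)) = false from by decide,
    if_neg (by omega : ¬((1:Int) ≤ 0 ∧
      (0:Int) + (pvLead (lines.map (fun line => PySem.Str.strip line == "")) : Int) > 2)),
    add_zero]
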